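-- pv_equiv track=rewrite | github.com/KrithikK7/Audio_watermarking | Embed/v4.1.py | block_deinterleave
-- ===== SOURCE A (Python) =====
-- import math
-- from typing import List, Tuple, Optional
--
-- def block_deinterleave(bits: List[int], depth: int) -> List[int]:
--     if depth <= 1:
--         return bits
--     rows = depth
--     cols = math.ceil(len(bits) / rows)
--     grid = [[0]*cols for _ in range(rows)]
--     idx = 0
--     # fill column-wise
--     for c in range(cols):
--         for r in range(rows):
--             if idx < len(bits):
--                 grid[r][c] = bits[idx]; idx += 1
--     # read row-wise
--     out = []
--     for r in range(rows):
--         for c in range(cols):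
--             out.append(grid[r][c])
--     return out[:len(bits)]
-- ===== SOURCE B (Python) =====
-- import math
-- from typing import List
--
-- def block_deinterleave(bits: List[int], depth: int) -> List[int]:
--     if depth <= 1:
--         return bits
--     rows = depth
--     cols = math.ceil(len(bits) / rows)
--     n = len(bits)
--     out = []
--     for p in range(n):
--         r, c = divmod(p, cols)
--         src = c * rows + r
--         out.append(bits[src] if src < n else 0)
--     return out
-- ===== Notes on version B (the rewrite author's own statement) =====
-- stated objective: simpler
-- what changed: B replaces A's explicitly allocated rows x cols grid (filled column-wise, read row-wise, then truncated) by a single loop over output positions that computes each source index by div/mod arithmetic, never building the grid.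
import Mathlib
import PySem

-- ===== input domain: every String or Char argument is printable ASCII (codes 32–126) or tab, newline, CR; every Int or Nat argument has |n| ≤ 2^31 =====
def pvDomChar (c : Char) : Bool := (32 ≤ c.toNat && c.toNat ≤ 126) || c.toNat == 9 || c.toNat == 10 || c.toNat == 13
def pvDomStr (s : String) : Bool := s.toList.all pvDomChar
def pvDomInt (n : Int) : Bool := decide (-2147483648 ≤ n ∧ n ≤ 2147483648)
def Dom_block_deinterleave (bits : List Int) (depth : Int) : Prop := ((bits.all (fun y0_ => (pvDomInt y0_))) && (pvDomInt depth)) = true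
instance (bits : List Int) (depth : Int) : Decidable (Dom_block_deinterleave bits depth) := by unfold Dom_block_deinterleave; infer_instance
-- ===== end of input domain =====

-- B replaces A's allocated rows×cols grid (fill column-wise, read row-wise, truncate) by a single
-- index-arithmetic loop computing the same permutation position by position (objective: simpler).

-- ===== PORT A =====
-- grid[r][c] = v  (indices are always in range in A, so getD/set are exact)
def pvGridSet (g : List (List Int)) (r c : Nat) (v : Int) : List (List Int) :=
  g.set r ((g.getD r []).set c v)

-- body of A's inner fill loop over r, state (grid, idx)
def pvFillInner (bits : List Int) (n c : Nat) (st : List (List Int) × Nat) (r : Nat) :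
    List (List Int) × Nat :=
  if st.2 < n then (pvGridSet st.1 r c (bits.getD st.2 0), st.2 + 1) else st

-- A's outer fill loop body: one column c
def pvFillCol (bits : List Int) (n rows : Nat) (st : List (List Int) × Nat) (c : Nat) :
    List (List Int) × Nat :=
  (List.range rows).foldl (pvFillInner bits n c) st

def block_deinterleave (bits : List Int) (depth : Int) : List Int :=
  if depth ≤ 1 then bits
  else
    let rows := depth.toNat
    let n := bits.length
    -- math.ceil(len(bits)/rows): exact ceiling division (float division is exact at these sizes)
    let cols := (n + rows - 1) / rows
    let grid :=
      ((List.range cols).foldl (pvFillCol bits n rows)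
        (List.replicate rows (List.replicate cols 0), 0)).1
    let out := (List.range rows).foldl (fun acc r =>
        (List.range cols).foldl (fun acc c => acc ++ [(grid.getD r []).getD c 0]) acc) []
    out.take n

-- ===== PORT B =====
def block_deinterleave_alt (bits : List Int) (depth : Int) : List Int :=
  if depth ≤ 1 then bits
  else
    let rows := depth.toNat
    let n := bits.length
    let cols := (n + rows - 1) / rows
    (List.range n).foldl (fun out p =>
      let r := p / cols
      let c := p % cols
      let src := c * rows + r
      out ++ [if src < n then bits.getD src 0 else 0]) []

-- ===== PRECONDITION & SPEC =====
def Spec_block_deinterleave (bits : List Int) (depth : Int) (out : List Int) : Prop := out = block_deinterleave_alt bits depth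
instance (bits : List Int) (depth : Int) (out : List Int) : Decidable (Spec_block_deinterleave bits depth out) := by unfold Spec_block_deinterleave; infer_instance

-- ===== CLAIM (what is proved, stated in full; the proofs are below) =====
def Claim_equal_block_deinterleave : Prop := ∀ (bits : List Int) (depth : Int), Dom_block_deinterleave bits depth → Spec_block_deinterleave bits depth (block_deinterleave bits depth)

-- ===== LEMMAS AND PROOFS =====

-- the grid after k positions of the column-wise fill have been visited
def pvG (bits : List Int) (n rows cols k : Nat) : List (List Int) :=
  (List.range rows).map (fun r => (List.range cols).map (fun c =>
    if c * rows + r < min k n then bits.getD (c * rows + r) 0 else 0))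

theorem pv_set_map_range {α : Type} (m i : Nat) (f : Nat → α) (v : α) (h : i < m) :
    ((List.range m).map f).set i v = (List.range m).map (fun x => if x = i then v else f x) := by
  apply List.ext_getElem
  · simp
  · intro j h1 h2
    simp only [List.length_set, List.length_map, List.length_range] at h1
    rcases eq_or_ne j i with rfl | hne
    · simp [List.getElem_set_self]
    · rw [List.getElem_set_ne (by omega)]; simp [hne]

theorem pv_pos_inj {rows : Nat} (c r c' r' : Nat) (hr : r < rows) (hr' : r' < rows)
    (h : c * rows + r = c' * rows + r') : c = c' ∧ r = r' := by
  have h1 : (c * rows + r) % rows = r := by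
    rw [Nat.add_comm, Nat.add_mul_mod_self_right, Nat.mod_eq_of_lt hr]
  have h2 : (c' * rows + r') % rows = r' := by
    rw [Nat.add_comm, Nat.add_mul_mod_self_right, Nat.mod_eq_of_lt hr']
  have hrr : r = r' := by rw [← h1, ← h2, h]
  constructor
  · subst hrr; have := Nat.eq_of_mul_eq_mul_right (by omega : 0 < rows) (by omega : c * rows = c' * rows); exact this
  · exact hrr

theorem pv_fill_step (bits : List Int) (n rows cols c j k : Nat)
    (hc : c < cols) (hj : j < rows) (hk : k = c * rows + j) :
    pvFillInner bits n c (pvG bits n rows cols k, min k n) j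
      = (pvG bits n rows cols (k + 1), min (k + 1) n) := by
  by_cases hkn : k < n
  · have hmin : min k n = k := by omega
    have hmin' : min (k + 1) n = k + 1 := by omega
    simp only [pvFillInner, hmin, hmin', if_pos hkn]
    refine Prod.ext ?_ rfl
    simp only [pvGridSet, pvG]
    rw [PySem.List.getD_map_range _ _ _ _ hj]
    rw [pv_set_map_range _ _ _ _ hc, pv_set_map_range _ _ _ _ hj]
    apply List.map_congr_left
    intro r hrmem
    have hr : r < rows := List.mem_range.mp hrmem
    rcases eq_or_ne r j with rfl | hne
    · rw [if_pos rfl]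
      apply List.map_congr_left
      intro c' hc'mem
      have hc' : c' < cols := List.mem_range.mp hc'mem
      rcases eq_or_ne c' c with rfl | hcne
      · rw [if_pos rfl, hmin', ← hk, if_pos (by omega)]
      · simp only [if_neg hcne]
        have hne2 : c' * rows + r ≠ k := by
          intro hcontra
          exact hcne (pv_pos_inj c' r c r hr hr (hcontra.trans hk)).1
        simp only [hmin, hmin']
        split_ifs with h1 h2 <;> first | rfl | omega
    · simp only [if_neg hne]
      apply List.map_congr_left
      intro c' hc'mem
      have hne2 : c' * rows + r ≠ k := by
        intro hcontra
        exact hne (pv_pos_inj c' r c j hr hj (hcontra.trans hk)).2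
      simp only [hmin, hmin']
      split_ifs with h1 h2 <;> first | rfl | omega
  · have hmin : min k n = n := by omega
    have hmin' : min (k + 1) n = n := by omega
    simp [pvFillInner, pvG, hmin, hmin']

theorem pv_fill_col (bits : List Int) (n rows cols c : Nat) (hc : c < cols) :
    ∀ j, j ≤ rows →
    (List.range j).foldl (pvFillInner bits n c) (pvG bits n rows cols (c * rows), min (c * rows) n)
      = (pvG bits n rows cols (c * rows + j), min (c * rows + j) n) := by
  intro j
  induction j with
  | zero => simp
  | succ j ih =>
    intro hle
    rw [List.range_succ, List.foldl_append, ih (by omega)]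
    simp only [List.foldl_cons, List.foldl_nil]
    rw [pv_fill_step bits n rows cols c j (c * rows + j) hc (by omega) rfl]
    rfl

theorem pv_fill_all (bits : List Int) (n rows cols : Nat) :
    ∀ m, m ≤ cols →
    (List.range m).foldl (pvFillCol bits n rows) (pvG bits n rows cols 0, 0)
      = (pvG bits n rows cols (m * rows), min (m * rows) n) := by
  intro m
  induction m with
  | zero => simp
  | succ m ih =>
    intro hle
    rw [List.range_succ, List.foldl_append, ih (by omega)]
    simp only [List.foldl_cons, List.foldl_nil, pvFillCol]
    rw [pv_fill_col bits n rows cols m (by omega) rows (le_refl rows)]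
    congr 2 <;> [skip; skip] <;> rw [Nat.succ_mul]

theorem pv_grid0_eq (bits : List Int) (n rows cols : Nat) :
    (List.replicate rows (List.replicate cols (0:Int))) = pvG bits n rows cols 0 := by
  simp only [pvG, Nat.zero_min]
  apply List.ext_getElem
  · simp
  · intro j h1 h2
    simp [List.map_const']

theorem pv_flatMap_range (rows cols : Nat) (f : Nat → Nat → Int) :
    (List.range rows).flatMap (fun r => (List.range cols).map (f r))
      = (List.range (rows * cols)).map (fun p => f (p / cols) (p % cols)) := by
  induction rows with
  | zero => simp
  | succ rows ih =>
    rw [List.range_succ, List.flatMap_append, ih]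
    have : (rows + 1) * cols = rows * cols + cols := by ring
    rw [this, List.range_add, List.map_append, List.map_map]
    congr 1
    · simp only [List.flatMap_cons, List.flatMap_nil, List.append_nil]
      apply List.map_congr_left
      intro c hcmem
      have hc : c < cols := List.mem_range.mp hcmem
      simp only [Function.comp_apply]
      have h1 : (rows * cols + c) / cols = rows := by
        rw [Nat.mul_comm, Nat.mul_add_div (by omega)]
        simp [Nat.div_eq_of_lt hc]
      have h2 : (rows * cols + c) % cols = c := by
        rw [Nat.mul_comm, Nat.mul_add_mod]
        exact Nat.mod_eq_of_lt hc
      rw [h1, h2]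

theorem pv_n_le (n rows : Nat) (hrows : 0 < rows) : n ≤ rows * ((n + rows - 1) / rows) := by
  have h := Nat.div_add_mod (n + rows - 1) rows
  have h2 : (n + rows - 1) % rows < rows := Nat.mod_lt _ hrows
  omega

-- ===== VERDICT (by name: the statement is the Claim_ definition above) =====
theorem block_deinterleave_spec : Claim_equal_block_deinterleave := by
  intro bits depth _
  unfold Spec_block_deinterleave block_deinterleave block_deinterleave_alt
  by_cases hd : depth ≤ 1
  · simp [hd]
  · simp only [if_neg hd]
    set rows := depth.toNat with hrows_def
    have hrows : 0 < rows := by simp only [hrows_def]; omega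
    set n := bits.length with hn_def
    set cols := (n + rows - 1) / rows with hcols_def
    have hnle : n ≤ rows * cols := pv_n_le n rows hrows
    -- B's loop is a map over range n
    rw [PySem.List.foldl_append_singleton_eq_map, List.nil_append]
    -- A's fill produces pvG at rows*cols
    rw [pv_grid0_eq bits n rows cols]
    have hfill := pv_fill_all bits n rows cols cols (le_refl cols)
    rw [hfill]
    have hminfin : min (cols * rows) n = n := by
      have : cols * rows = rows * cols := by ring
      omega
    -- A's read-out is a flatMap over the rows
    have hread : ∀ (g : List (List Int)),
        (List.range rows).foldl (fun acc r =>
          (List.range cols).foldl (fun acc c => acc ++ [(g.getD r []).getD c 0]) acc) []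
        = (List.range rows).flatMap (fun r => (List.range cols).map (fun c => (g.getD r []).getD c 0)) := by
      intro g
      have hbody : (fun (acc : List Int) r =>
          (List.range cols).foldl (fun acc c => acc ++ [(g.getD r []).getD c 0]) acc)
          = (fun acc r => acc ++ (List.range cols).map (fun c => (g.getD r []).getD c 0)) := by
        funext acc r
        rw [PySem.List.foldl_append_singleton_eq_map]
      rw [hbody, PySem.List.foldl_append_eq_flatMap, List.nil_append]
    rw [hread, pv_flatMap_range]
    -- truncate the row-read to n entries
    rw [← List.map_take, List.take_range, Nat.min_eq_left hnle]
    apply List.map_congr_left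
    intro p hpmem
    have hp : p < n := List.mem_range.mp hpmem
    have hcols : 0 < cols := by
      rcases Nat.eq_zero_or_pos cols with h0 | h
      · rw [h0, Nat.mul_zero] at hnle; omega
      · exact h
    have hr : p / cols < rows := by
      apply Nat.div_lt_of_lt_mul
      have : rows * cols = cols * rows := Nat.mul_comm _ _
      omega
    have hc : p % cols < cols := Nat.mod_lt _ hcols
    simp only [pvG]
    rw [PySem.List.getD_map_range _ _ _ _ hr, PySem.List.getD_map_range _ _ _ _ hc]
    have : min (cols * rows) n = n := hminfin
    rw [this]
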